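-- pv_equiv track=rewrite | github.com/TwoChill/Generators | Word_List_Generator.py | tline
-- ===== SOURCE A (Python) =====
-- import itertools
--
-- def tline(k, n, chrs, v):
--
--     """ This function returns the correct number of lines. Used for TQDM progress bar.
--     Using math to calculate the correct number of lines (incl. exclude sequental characters)
--     would be a more efficient and logical way to use this script. """
--
--     tline = 0
--     for i in range(k, n):
--         for xs in itertools.product(chrs, repeat=i):
--             if v > 0:
--                 cnts = [sum(1 for i in grp[1])
--                         for grp in itertools.groupby(xs)]
--                 if max(cnts) > v:
--                     continue
--                 tline += 1
--             else:
--                 tline += 1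
--     return tline
-- ===== SOURCE B (Python) =====
-- def tline(k, n, chrs, v):
--     lo = k if k > 0 else 0
--     if n <= lo:
--         return 0
--     m = len(chrs)
--     if v <= 0 or v >= n - 1:
--         # no run can exceed v, so every string of each length in [lo, n) counts
--         if m == 0:
--             return 1 if lo == 0 else 0
--         if m == 1:
--             return n - lo
--         return (m ** n - m ** lo) // (m - 1)
--     # weighted DP over the leading run: rows[j][r] = number of length-i strings
--     # whose leading run is exactly r copies of chars[j], every run <= v
--     chars = list(dict.fromkeys(chrs))
--     mults = [chrs.count(c) for c in chars]
--     rows = [[0] * (v + 1) for _ in chars]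
--     total = 1
--     ans = 1 if lo == 0 else 0
--     for i in range(1, n):
--         rows = [[0, mc * (total - sum(row))] + [mc * x for x in row[1:v]]
--                 for mc, row in zip(mults, rows)]
--         total = sum(sum(row) for row in rows)
--         if i >= lo:
--             ans += total
--     return ans
-- ===== Notes on version B (the rewrite author's own statement) =====
-- stated objective: alternative
-- what changed: A enumerates every tuple over the alphabet and run-length-checks each; B instead uses a closed-form geometric sum when the run bound cannot bite and otherwise a dynamic programme over (leading character, leading-run length) weighted by character multiplicities, so no tuple is ever enumerated.
import Mathlib
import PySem

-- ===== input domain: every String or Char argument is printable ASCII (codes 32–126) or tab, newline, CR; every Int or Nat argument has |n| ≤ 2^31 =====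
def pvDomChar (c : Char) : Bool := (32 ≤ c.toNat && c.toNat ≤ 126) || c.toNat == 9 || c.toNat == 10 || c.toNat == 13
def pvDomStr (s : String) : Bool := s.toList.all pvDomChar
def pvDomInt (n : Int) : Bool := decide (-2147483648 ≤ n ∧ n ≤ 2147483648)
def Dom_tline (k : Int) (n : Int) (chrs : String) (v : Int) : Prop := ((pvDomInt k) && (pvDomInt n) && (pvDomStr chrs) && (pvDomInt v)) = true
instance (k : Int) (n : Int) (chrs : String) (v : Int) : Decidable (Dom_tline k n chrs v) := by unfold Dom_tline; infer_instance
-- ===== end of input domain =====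

-- B replaces A's enumeration of all tuples by a closed-form geometric sum (when
-- the run bound cannot bite) and a multiplicity-weighted DP over the leading run.

-- ===== PORT A =====
-- itertools.groupby run lengths: scan keeping the current group's element and count
def tlineRlAux (c : Char) (cnt : Int) : List Char → List Int
  | [] => [cnt]
  | d :: rest => if d = c then tlineRlAux c (cnt + 1) rest else cnt :: tlineRlAux d 1 rest

def tlineRuns : List Char → List Int
  | [] => []
  | c :: rest => tlineRlAux c 1 rest

-- itertools.product(chrs, repeat=i) in CPython order (first coordinate slowest)
def tlineProd (cs : List Char) : Nat → List (List Char)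
  | 0 => [[]]
  | j + 1 => cs.flatMap (fun c => (tlineProd cs j).map (c :: ·))

def tline (k : Int) (n : Int) (chrs : String) (v : Int) : Int :=
  (PySem.List.pyRange k n 1).foldl (fun t i =>
    (tlineProd chrs.toList i.toNat).foldl (fun t xs =>
      if v > 0 then
        let cnts := tlineRuns xs
        if (PySem.List.max? cnts (fun y => y)).getD 0 > v then t else t + 1
      else t + 1) t) 0

-- ===== PORT B =====
-- one DP row: [0, mc*(total - sum(row))] + [mc*x for x in row[1:v]]
def tlineRow (v total mc : Int) (row : List Int) : List Int :=
  [0, mc * (total - row.sum)] ++ (PySem.List.slice row (some 1) (some v)).map (fun x => mc * x)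

-- one iteration of B's loop body over state (rows, total, ans)
def tlineStep (lo v : Int) (mults : List Int) (st : List (List Int) × Int × Int) (i : Int) :
    List (List Int) × Int × Int :=
  let rows := (mults.zip st.1).map (fun p => tlineRow v st.2.1 p.1 p.2)
  let total := (rows.map List.sum).sum
  (rows, total, if lo ≤ i then st.2.2 + total else st.2.2)

def tline_alt (k : Int) (n : Int) (chrs : String) (v : Int) : Int :=
  let lo := if k > 0 then k else 0
  if n ≤ lo then 0
  else
    let m : Int := PySem.Str.len chrs
    if v ≤ 0 ∨ n - 1 ≤ v then
      if m = 0 then (if lo = 0 then 1 else 0)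
      else if m = 1 then n - lo
      else PySem.Int.floordiv (m ^ n.toNat - m ^ lo.toNat) (m - 1)
    else
      let cs := chrs.toList
      let chars := PySem.List.dedup cs
      let mults := chars.map (fun c => (PySem.List.count cs c : Int))
      ((PySem.List.pyRange 1 n 1).foldl (tlineStep lo v mults)
        (chars.map (fun _ => List.replicate (v + 1).toNat (0 : Int)), 1, if lo = 0 then 1 else 0)).2.2

-- ===== PRECONDITION & SPEC =====
-- Pre_ excludes exactly the inputs where A raises: a negative length reaches
-- itertools.product (ValueError), or v > 0 with length 0 reaches max([]) (ValueError).
def Pre_tline (k : Int) (n : Int) (chrs : String) (v : Int) : Prop :=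
  n ≤ k ∨ 1 ≤ k ∨ (0 ≤ k ∧ v ≤ 0)
instance (k : Int) (n : Int) (chrs : String) (v : Int) : Decidable (Pre_tline k n chrs v) := by
  unfold Pre_tline; infer_instance

def pvWitness_tline : Int × Int × String × Int := (1, 4, "ab", 2)

def Spec_tline (k : Int) (n : Int) (chrs : String) (v : Int) (out : Int) : Prop := out = tline_alt k n chrs v
instance (k : Int) (n : Int) (chrs : String) (v : Int) (out : Int) : Decidable (Spec_tline k n chrs v out) := by
  unfold Spec_tline; infer_instance

-- ===== CLAIM (what is proved, stated in full; the proofs are below) =====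
def Claim_equal_tline : Prop := ∀ (k : Int) (n : Int) (chrs : String) (v : Int), Dom_tline k n chrs v → Pre_tline k n chrs v → Spec_tline k n chrs v (tline k n chrs v)

-- ===== LEMMAS AND PROOFS =====

-- length of the leading run of copies of c
def frun (c : Char) : List Char → Int
  | [] => 0
  | d :: xs => if d = c then frun c xs + 1 else 0

-- the list with its leading run of copies of c removed
def dropRun (c : Char) : List Char → List Char
  | [] => []
  | d :: xs => if d = c then dropRun c xs else d :: xs

-- running max with initial value 0
def mx (l : List Int) : Int := l.foldl max 0

-- the longest run of xs (0 for the empty list)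
def Fm (xs : List Char) : Int := mx (tlineRuns xs)

-- A's max expression
def Mv (xs : List Char) : Int := (PySem.List.max? (tlineRuns xs) (fun y => y)).getD 0

-- number of valid (all runs ≤ v) tuples of length j
def cntV (cs : List Char) (v : Int) (j : Nat) : Nat :=
  (tlineProd cs j).countP (fun xs => decide (Fm xs ≤ v))

-- number of valid tuples of length j whose leading run is exactly r copies of c
def cntR (cs : List Char) (v : Int) (j : Nat) (c : Char) (r : Int) : Nat :=
  (tlineProd cs j).countP (fun xs => decide (Fm xs ≤ v) && decide (frun c xs = r))

def rowSpec (cs : List Char) (v : Int) (j : Nat) (c : Char) : List Int :=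
  0 :: (List.range v.toNat).map (fun (r : Nat) => (cntR cs v j c ((r : Int) + 1) : Int))

def ansSpec (cs : List Char) (v : Int) (k : Int) (j : Nat) : Int :=
  ((PySem.List.pyRange k (1 + (j : Int)) 1).map (fun i => (cntV cs v i.toNat : Int))).sum

theorem frun_nonneg (c : Char) (xs : List Char) : 0 ≤ frun c xs := by
  induction xs with
  | nil => simp [frun]
  | cons d xs ih => by_cases h : d = c <;> simp [frun, h] <;> omega
theorem frun_le_length (c : Char) (xs : List Char) : frun c xs ≤ xs.length := by
  induction xs with
  | nil => simp [frun]
  | cons d xs ih =>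
    by_cases h : d = c <;> simp [frun, h]
    · omega
    · have := frun_nonneg c xs; omega
theorem frun_cons_eq (c : Char) (xs : List Char) : frun c (c :: xs) = frun c xs + 1 := by
  simp [frun]
theorem frun_cons_ne {c d : Char} (h : d ≠ c) (xs : List Char) : frun c (d :: xs) = 0 := by
  simp [frun, h]

theorem rlAux_eq (c : Char) (m : Int) (xs : List Char) :
    tlineRlAux c m xs = (m + frun c xs) :: tlineRuns (dropRun c xs) := by
  induction xs generalizing c m with
  | nil => simp [tlineRlAux, frun, dropRun, tlineRuns]
  | cons d ys ih =>
    by_cases h : d = c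
    · subst h
      have e1 : tlineRlAux d m (d :: ys) = tlineRlAux d (m + 1) ys := by simp [tlineRlAux]
      have e2 : dropRun d (d :: ys) = dropRun d ys := by simp [dropRun]
      rw [e1, ih, frun_cons_eq, e2]
      have e3 : m + 1 + frun d ys = m + (frun d ys + 1) := by ring
      rw [e3]
    · simp only [tlineRlAux, if_neg h, frun, if_neg h, dropRun]
      simp [tlineRuns]

theorem runs_cons (c : Char) (xs : List Char) :
    tlineRuns (c :: xs) = (1 + frun c xs) :: tlineRuns (dropRun c xs) := rlAux_eq c 1 xs

theorem dropRun_eq_self {c : Char} {xs : List Char} (h : frun c xs = 0) : dropRun c xs = xs := by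
  cases xs with
  | nil => rfl
  | cons d ys =>
    by_cases hd : d = c
    · rw [hd, frun_cons_eq] at h; have := frun_nonneg c ys; omega
    · simp [dropRun, hd]

theorem runs_frun_pos {c : Char} {xs : List Char} (h : 0 < frun c xs) :
    tlineRuns xs = frun c xs :: tlineRuns (dropRun c xs) := by
  cases xs with
  | nil => simp [frun] at h
  | cons d ys =>
    by_cases hd : d = c
    · subst hd
      rw [runs_cons, frun_cons_eq]
      simp [dropRun]
      ring_nf
    · rw [frun_cons_ne hd] at h; omega

theorem mx_nonneg (l : List Int) : 0 ≤ mx l := (PySem.List.le_foldl_max l 0).1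
theorem foldl_max_eq_max_mx (l : List Int) (b : Int) (hb : 0 ≤ b) :
    l.foldl max b = max b (mx l) := by
  induction l generalizing b with
  | nil => simp [mx]; omega
  | cons x l ih =>
    have h1 : (0:Int) ≤ max b x := by omega
    have h2 : (0:Int) ≤ max 0 x := by omega
    have e : mx (x :: l) = max (max 0 x) (mx l) := by
      have e0 : mx (x :: l) = List.foldl max (max 0 x) l := rfl
      rw [e0, ih _ h2]
    rw [List.foldl_cons, ih _ h1, e]
    omega
theorem mx_cons {a : Int} (ha : 0 ≤ a) (l : List Int) : mx (a :: l) = max a (mx l) := by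
  show (a :: l).foldl max 0 = _
  rw [List.foldl_cons, show max 0 a = a by omega, foldl_max_eq_max_mx l a ha]

theorem Fm_nil : Fm [] = 0 := rfl
theorem Fm_nonneg (xs : List Char) : 0 ≤ Fm xs := mx_nonneg _
theorem Fm_cons (c : Char) (xs : List Char) : Fm (c :: xs) = max (1 + frun c xs) (Fm xs) := by
  have hf := frun_nonneg c xs
  unfold Fm
  rw [runs_cons, mx_cons (by omega)]
  by_cases h : frun c xs = 0
  · rw [dropRun_eq_self h]
  · have hp : 0 < frun c xs := by omega
    rw [runs_frun_pos hp, mx_cons (by omega)]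
    omega
theorem Mv_eq_Fm (xs : List Char) : Mv xs = Fm xs := by
  cases xs with
  | nil => rfl
  | cons c ys =>
    have hf := frun_nonneg c ys
    unfold Mv Fm
    rw [runs_cons, PySem.List.max?_id_cons, Option.getD_some,
        foldl_max_eq_max_mx _ _ (by omega), mx_cons (by omega)]
theorem Fm_le_length (xs : List Char) : Fm xs ≤ xs.length := by
  induction xs with
  | nil => simp [Fm_nil]
  | cons c ys ih =>
    rw [Fm_cons]
    have := frun_le_length c ys
    simp only [List.length_cons]
    omega
theorem frun_le_Fm (c : Char) (xs : List Char) : frun c xs ≤ Fm xs := by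
  cases xs with
  | nil => simp [frun, Fm_nil]
  | cons d ys =>
    by_cases hd : d = c
    · subst hd
      rw [Fm_cons, frun_cons_eq]
      omega
    · rw [frun_cons_ne hd]
      exact Fm_nonneg _

theorem prod_length (cs : List Char) (j : Nat) : (tlineProd cs j).length = cs.length ^ j := by
  induction j with
  | zero => simp [tlineProd]
  | succ j ih =>
    simp [tlineProd, List.length_flatMap, ih, Function.comp_def, pow_succ]
    ring
theorem length_of_mem_prod {cs : List Char} {j : Nat} {xs : List Char}
    (h : xs ∈ tlineProd cs j) : xs.length = j := by
  induction j generalizing xs with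
  | zero => simp [tlineProd] at h; simp [h]
  | succ j ih =>
    simp only [tlineProd, List.mem_flatMap, List.mem_map] at h
    obtain ⟨c, -, ys, hy, rfl⟩ := h
    simp [ih hy]

-- sum over range of a point indicator
theorem sum_map_add_nat {α : Type} (l : List α) (f g : α → Nat) :
    (l.map (fun x => f x + g x)).sum = (l.map f).sum + (l.map g).sum := by
  induction l with
  | nil => simp
  | cons a l ih => simp only [List.map_cons, List.sum_cons, ih]; omega

-- sum over range of a point indicator
theorem sum_indicator_one {N r₀ : Nat} (h : r₀ < N) :
    ((List.range N).map (fun r => if r = r₀ then (1 : Nat) else 0)).sum = 1 := by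
  induction N with
  | zero => omega
  | succ N ih =>
    rw [List.range_succ, List.map_append, List.sum_append]
    by_cases hN : r₀ = N
    · subst hN
      have hz : ((List.range r₀).map (fun r => if r = r₀ then (1 : Nat) else 0)).sum = 0 := by
        apply List.sum_eq_zero
        intro x hx
        simp only [List.mem_map, List.mem_range] at hx
        obtain ⟨r, hr, rfl⟩ := hx
        have : r ≠ r₀ := by omega
        simp [this]
      simp [hz]
    · have h' : r₀ < N := by omega
      rw [ih h']
      have hns : N ≠ r₀ := fun he => hN he.symm
      simp [hns]

theorem countP_partition {α : Type} (l : List α) (p : α → Bool) (f : α → Int) (N : Nat)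
    (h : ∀ x ∈ l, p x = true → 0 ≤ f x ∧ f x < N) :
    l.countP p = ((List.range N).map (fun (r : Nat) => l.countP (fun x => p x && decide (f x = (r : Int))))).sum := by
  induction l with
  | nil => simp
  | cons a l ih =>
    have hal := ih (fun x hx => h x (List.mem_cons_of_mem a hx))
    simp only [List.countP_cons]
    have hsplit : ((List.range N).map (fun (r : Nat) => l.countP (fun x => p x && decide (f x = (r : Int)))
          + if (p a && decide (f a = (r : Int))) then 1 else 0)).sum
        = ((List.range N).map (fun (r : Nat) => l.countP (fun x => p x && decide (f x = (r : Int))))).sum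
          + ((List.range N).map (fun (r : Nat) => if (p a && decide (f a = (r : Int))) then 1 else 0)).sum := by
      rw [← sum_map_add_nat]
    rw [hsplit, ← hal]
    by_cases hpa : p a = true
    · obtain ⟨h0, hN⟩ := h a (List.mem_cons_self) hpa
      have hlt : (f a).toNat < N := by omega
      have hind : ((List.range N).map (fun (r : Nat) => if (p a && decide (f a = (r : Int))) then 1 else 0)).sum = 1 := by
        have hcg : ((List.range N).map (fun (r : Nat) => if (p a && decide (f a = (r : Int))) then 1 else 0))
            = ((List.range N).map (fun r => if r = (f a).toNat then (1 : Nat) else 0)) := by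
          apply List.map_congr_left
          intro r _
          rw [hpa]
          simp only [Bool.true_and]
          by_cases he : r = (f a).toNat
          · have hd : f a = (r : Int) := by omega
            rw [decide_eq_true hd]
            simp [he]
          · have hd : ¬ (f a = (r : Int)) := by omega
            rw [decide_eq_false hd]
            simp [he]
        rw [hcg]
        exact sum_indicator_one hlt
      rw [hind, hpa]
      simp
    · have hpa' : p a = false := by simpa using hpa
      have hz : ((List.range N).map (fun (r : Nat) => if (p a && decide (f a = (r : Int))) then 1 else 0)).sum = 0 := by
        apply List.sum_eq_zero
        intro x hx
        simp only [List.mem_map] at hx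
        obtain ⟨r, -, rfl⟩ := hx
        simp [hpa']
      rw [hz, hpa']
      simp

theorem sum_single {α : Type} [DecidableEq α] {chars : List α} {a : α} (X : α → Nat)
    (hn : chars.Nodup) (ha : a ∈ chars) :
    (chars.map (fun c => if c = a then X c else 0)).sum = X a := by
  induction chars with
  | nil => simp at ha
  | cons b l ih =>
    simp only [List.map_cons, List.sum_cons]
    rcases List.mem_cons.mp ha with hb | hl
    · subst hb
      have hz : (l.map (fun c => if c = a then X c else 0)).sum = 0 := by
        apply List.sum_eq_zero
        intro x hx
        simp only [List.mem_map] at hx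
        obtain ⟨c, hc, rfl⟩ := hx
        have : c ≠ a := fun he => (List.nodup_cons.mp hn).1 (he ▸ hc)
        simp [this]
      simp [hz]
    · have hba : b ≠ a := fun he => (List.nodup_cons.mp hn).1 (he ▸ hl)
      rw [ih (List.nodup_cons.mp hn).2 hl]
      simp [hba]

-- group a sum over cs by the distinct values
theorem group_by_count {α : Type} [DecidableEq α] (cs chars : List α) (g : α → Nat)
    (hn : chars.Nodup) (hm : ∀ c ∈ cs, c ∈ chars) :
    (cs.map g).sum = (chars.map (fun c => List.count c cs * g c)).sum := by
  induction cs with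
  | nil => simp
  | cons a l ih =>
    have hal : ∀ c ∈ l, c ∈ chars := fun c hc => hm c (List.mem_cons_of_mem a hc)
    have ha : a ∈ chars := hm a List.mem_cons_self
    simp only [List.map_cons, List.sum_cons]
    rw [ih hal]
    have hcg : (chars.map (fun c => List.count c (a :: l) * g c)).sum
        = (chars.map (fun c => List.count c l * g c + (if c = a then g c else 0))).sum := by
      apply congrArg
      apply List.map_congr_left
      intro c _
      rw [List.count_cons]
      by_cases h : c = a
      · rw [if_pos h, if_pos (by simp [h])]
        ring
      · rw [if_neg h, if_neg (by simp only [beq_iff_eq]; exact fun he => h he.symm)]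
        ring
    rw [hcg, sum_map_add_nat, sum_single g hn ha]
    omega

theorem sum_ite_count {α : Type} [DecidableEq α] (cs : List α) (c : α) (X : Nat) :
    (cs.map (fun c' => if c' = c then X else 0)).sum = List.count c cs * X := by
  induction cs with
  | nil => simp
  | cons a l ih =>
    simp only [List.map_cons, List.sum_cons, ih, List.count_cons]
    by_cases h : a = c
    · rw [if_pos h, if_pos (by simp [h])]
      ring
    · rw [if_neg h, if_neg (by simp only [beq_iff_eq]; exact h)]
      ring

theorem countP_prod_succ (cs : List Char) (j : Nat) (p : List Char → Bool) :
    (tlineProd cs (j + 1)).countP p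
      = (cs.map (fun c => (tlineProd cs j).countP (fun xs => p (c :: xs)))).sum := by
  simp [tlineProd, List.countP_flatMap, List.countP_map, Function.comp_def]

theorem valid_cons (v : Int) (c : Char) (xs : List Char) :
    (Fm (c :: xs) ≤ v) ↔ (1 + frun c xs ≤ v ∧ Fm xs ≤ v) := by
  rw [Fm_cons]
  omega

theorem part_valid (cs : List Char) (v : Int) (j : Nat) (c : Char) (hv : 1 ≤ v) :
    cntV cs v j
      = ((List.range (v.toNat + 1)).map
          (fun (r : Nat) => (tlineProd cs j).countP
            (fun xs => decide (Fm xs ≤ v) && decide (frun c xs = (r : Int))))).sum := by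
  apply countP_partition
  intro xs _ hp
  have h1 := frun_nonneg c xs
  have h2 := frun_le_Fm c xs
  have h3 : Fm xs ≤ v := by simpa using hp
  constructor
  · exact h1
  · have : ((v.toNat : Int) + 1) = v + 1 := by omega
    push_cast
    omega

theorem sum_map_mul_left_nat {α : Type} (l : List α) (K : Nat) (f : α → Nat) :
    (l.map (fun x => K * f x)).sum = K * (l.map f).sum := by
  induction l with
  | nil => simp
  | cons a l ih => simp only [List.map_cons, List.sum_cons, ih]; ring

theorem sum_map_cast {α : Type} (l : List α) (f : α → Nat) :
    (l.map (fun x => (f x : Int))).sum = ((l.map f).sum : Int) := by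
  induction l with
  | nil => simp
  | cons a l ih => simp only [List.map_cons, List.sum_cons, ih]; push_cast; ring

theorem rec_one (cs : List Char) (v : Int) (j : Nat) (c : Char) (hv : 1 ≤ v) :
    cntR cs v (j + 1) c 1
      = List.count c cs *
          (tlineProd cs j).countP (fun xs => decide (Fm xs ≤ v) && decide (frun c xs = 0)) := by
  unfold cntR
  rw [countP_prod_succ, ← sum_ite_count cs c]
  apply congrArg
  apply List.map_congr_left
  intro c' _
  by_cases hc : c' = c
  · subst hc
    rw [if_pos rfl]
    apply List.countP_congr
    intro xs _
    simp only [Bool.and_eq_true, decide_eq_true_eq, valid_cons, frun_cons_eq]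
    omega
  · rw [if_neg hc]
    rw [List.countP_eq_zero]
    intro xs _
    simp [frun_cons_ne hc]

theorem rec_succ (cs : List Char) (v : Int) (j : Nat) (c : Char) (r : Int)
    (hr : 1 ≤ r) (hrv : r + 1 ≤ v) :
    cntR cs v (j + 1) c (r + 1) = List.count c cs * cntR cs v j c r := by
  unfold cntR
  rw [countP_prod_succ, ← sum_ite_count cs c]
  apply congrArg
  apply List.map_congr_left
  intro c' _
  by_cases hc : c' = c
  · subst hc
    rw [if_pos rfl]
    apply List.countP_congr
    intro xs _
    simp only [Bool.and_eq_true, decide_eq_true_eq, valid_cons, frun_cons_eq]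
    omega
  · rw [if_neg hc]
    rw [List.countP_eq_zero]
    intro xs _
    simp only [Bool.and_eq_true, decide_eq_true_eq, frun_cons_ne hc]
    omega

theorem rec_total (cs : List Char) (v : Int) (j : Nat) (hv : 1 ≤ v) :
    cntV cs v (j + 1)
      = ((PySem.List.dedup cs).map
          (fun c => ((List.range v.toNat).map (fun (r : Nat) => cntR cs v (j + 1) c ((r : Int) + 1))).sum)).sum := by
  -- per-character partial counts of length-j tuples
  set g : Char → Nat := fun c =>
    ((List.range v.toNat).map
      (fun (r : Nat) => (tlineProd cs j).countP
        (fun xs => decide (Fm xs ≤ v) && decide (frun c xs = (r : Int))))).sum with hg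
  have hstep2 : ∀ c : Char,
      (tlineProd cs j).countP (fun xs => decide (Fm (c :: xs) ≤ v)) = g c := by
    intro c
    have h1 : (tlineProd cs j).countP (fun xs => decide (Fm (c :: xs) ≤ v))
        = (tlineProd cs j).countP (fun xs => decide (Fm xs ≤ v) && decide (frun c xs + 1 ≤ v)) := by
      apply List.countP_congr
      intro xs _
      simp only [decide_eq_true_eq, Bool.and_eq_true, valid_cons]
      omega
    rw [h1, countP_partition _ _ (frun c) v.toNat
        (by
          intro xs _ hp
          have := frun_nonneg c xs
          simp only [Bool.and_eq_true, decide_eq_true_eq] at hp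
          omega)]
    rw [hg]
    apply congrArg
    apply List.map_congr_left
    intro r hr
    simp only [List.mem_range] at hr
    apply List.countP_congr
    intro xs _
    simp only [Bool.and_eq_true, decide_eq_true_eq]
    constructor
    · rintro ⟨⟨h1, h2⟩, h3⟩; exact ⟨h1, h3⟩
    · rintro ⟨h1, h3⟩
      refine ⟨⟨h1, ?_⟩, h3⟩
      omega
  have hrow : ∀ c : Char,
      ((List.range v.toNat).map (fun (r : Nat) => cntR cs v (j + 1) c ((r : Int) + 1))).sum
        = List.count c cs * g c := by
    intro c
    obtain ⟨w, hw⟩ : ∃ w, v.toNat = w + 1 := ⟨v.toNat - 1, by omega⟩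
    have hdec : ∀ (h : Nat → Nat), ((List.range (w + 1)).map h).sum = h 0 + ((List.range w).map (fun r => h (r + 1))).sum := by
      intro h
      rw [List.range_succ_eq_map]
      simp [List.map_map, Function.comp_def]
    rw [hg, hw]
    beta_reduce
    rw [hdec, hdec]
    rw [show ((0 : Nat) : Int) + 1 = 1 by norm_num, rec_one cs v j c hv]
    have hcg : ((List.range w).map (fun r => cntR cs v (j + 1) c (((r + 1 : Nat) : Int) + 1))).sum
        = ((List.range w).map (fun r => List.count c cs * cntR cs v j c (((r + 1 : Nat) : Int)))).sum := by
      apply congrArg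
      apply List.map_congr_left
      intro r hr
      simp only [List.mem_range] at hr
      have h1 : (1 : Int) ≤ ((r + 1 : Nat) : Int) := by push_cast; omega
      have h2 : ((r + 1 : Nat) : Int) + 1 ≤ v := by push_cast; omega
      exact rec_succ cs v j c _ h1 h2
    rw [hcg, sum_map_mul_left_nat, Nat.mul_add]
    rfl
  unfold cntV
  rw [countP_prod_succ]
  rw [show (cs.map (fun c => (tlineProd cs j).countP (fun xs => decide (Fm (c :: xs) ≤ v)))) = cs.map g from
    List.map_congr_left (fun c _ => hstep2 c)]
  rw [group_by_count cs (PySem.List.dedup cs) g (PySem.List.nodup_dedup cs)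
    (fun c hc => (PySem.List.mem_dedup cs c).mpr hc)]
  apply congrArg
  apply List.map_congr_left
  intro c _
  rw [hrow c]

theorem part_valid' (cs : List Char) (v : Int) (j : Nat) (c : Char) (hv : 1 ≤ v) :
    cntV cs v j = cntR cs v j c 0
      + ((List.range v.toNat).map (fun (r : Nat) => cntR cs v j c ((r : Int) + 1))).sum := by
  rw [part_valid cs v j c hv, List.range_succ_eq_map, List.map_cons, List.sum_cons, List.map_map]
  have h0 : ((0 : Nat) : Int) = 0 := rfl
  apply congrArg₂
  · rfl
  · apply congrArg
    apply List.map_congr_left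
    intro r _
    unfold cntR
    apply List.countP_congr
    intro xs _
    simp only [Function.comp_def, Bool.and_eq_true, decide_eq_true_eq]
    constructor
    · rintro ⟨h1, h2⟩; refine ⟨h1, ?_⟩; push_cast at h2 ⊢; omega
    · rintro ⟨h1, h2⟩; refine ⟨h1, ?_⟩; push_cast at h2 ⊢; omega

theorem row_step (cs : List Char) (v : Int) (j : Nat) (c : Char) (v' : Nat)
    (hv : v = (v' : Int)) (hv1 : 1 ≤ v') :
    tlineRow v (cntV cs v j) ((List.count c cs : Int)) (rowSpec cs v j c) = rowSpec cs v (j + 1) c := by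
  have hvv : v.toNat = v' := by rw [hv]; exact Int.toNat_natCast v'
  have hv0 : (1 : Int) ≤ v := by rw [hv]; exact_mod_cast hv1
  obtain ⟨w, hw⟩ : ∃ w, v' = w + 1 := ⟨v' - 1, by omega⟩
  have hpart := part_valid' cs v j c hv0
  -- the first DP entry
  have hfirst : (List.count c cs : Int) * ((cntV cs v j : Int) - (rowSpec cs v j c).sum)
      = (cntR cs v (j + 1) c 1 : Int) := by
    have hsum : (rowSpec cs v j c).sum
        = (((List.range v.toNat).map (fun (r : Nat) => cntR cs v j c ((r : Int) + 1))).sum : Int) := by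
      unfold rowSpec
      rw [List.sum_cons, sum_map_cast]
      ring
    rw [hsum, rec_one cs v j c hv0]
    rw [hpart]
    unfold cntR
    push_cast
    ring
  -- the slice part
  have hslice : (PySem.List.slice (rowSpec cs v j c) (some 1) (some v)).map
        (fun x => (List.count c cs : Int) * x)
      = (List.range w).map (fun (r : Nat) => (cntR cs v (j + 1) c ((r : Int) + 2) : Int)) := by
    rw [PySem.List.slice_toNat _ (by omega) (by omega)]
    unfold rowSpec
    rw [show ((1 : Int).toNat) = 1 from rfl]
    rw [List.drop_one, List.tail_cons, ← List.map_take, List.take_range, List.map_map]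
    have hrange : min (v.toNat - 1) v.toNat = w := by omega
    rw [hrange]
    apply List.map_congr_left
    intro r hr
    simp only [List.mem_range] at hr
    simp only [Function.comp_def]
    have h1 : (1 : Int) ≤ (r : Int) + 1 := by omega
    have h2 : ((r : Int) + 1) + 1 ≤ v := by rw [hv]; push_cast; omega
    have := rec_succ cs v j c ((r : Int) + 1) h1 h2
    rw [show ((r : Int) + 1) + 1 = (r : Int) + 2 from by ring] at this
    rw [this]
    push_cast
    ring
  -- assemble
  unfold tlineRow
  rw [hfirst, hslice]
  unfold rowSpec
  rw [show v.toNat = w + 1 from by omega, List.range_succ_eq_map, List.map_cons, List.map_map]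
  simp only [List.cons_append, List.nil_append]
  apply congrArg
  apply congrArg₂
  · norm_num
  · apply List.map_congr_left
    intro r _
    simp only [Function.comp_def]
    have : ((r + 1 : Nat) : Int) + 1 = (r : Int) + 2 := by push_cast; ring
    rw [this]

theorem rowSpec_zero (cs : List Char) (v : Int) (c : Char) (hv0 : 0 ≤ v) :
    List.replicate (v + 1).toNat (0 : Int) = rowSpec cs v 0 c := by
  have hz : ∀ r : Nat, cntR cs v 0 c ((r : Int) + 1) = 0 := by
    intro r
    unfold cntR tlineProd
    rw [List.countP_eq_zero]
    intro xs hxs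
    simp only [List.mem_singleton] at hxs
    subst hxs
    simp only [Bool.and_eq_true, decide_eq_true_eq]
    rintro ⟨-, h2⟩
    rw [show frun c [] = 0 from rfl] at h2
    omega
  unfold rowSpec
  have hmap : (List.range v.toNat).map (fun (r : Nat) => (cntR cs v 0 c ((r : Int) + 1) : Int))
      = (List.range v.toNat).map (fun (_ : Nat) => (0 : Int)) := by
    apply List.map_congr_left
    intro r _
    rw [hz r]
    rfl
  rw [hmap, List.map_const', List.length_range]
  rw [show (v + 1).toNat = v.toNat + 1 from by omega, List.replicate_succ]

theorem cntV_zero (cs : List Char) (v : Int) (hv0 : 0 ≤ v) : cntV cs v 0 = 1 := by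
  unfold cntV tlineProd
  have h : Fm ([] : List Char) ≤ v := by rw [Fm_nil]; omega
  simp [List.countP_cons, h]

theorem rowSpec_sum (cs : List Char) (v : Int) (j : Nat) (c : Char) :
    (rowSpec cs v j c).sum
      = (((List.range v.toNat).map (fun (r : Nat) => cntR cs v j c ((r : Int) + 1))).sum : Int) := by
  unfold rowSpec
  rw [List.sum_cons, sum_map_cast]
  ring

theorem dp_inv (cs : List Char) (v k : Int) (v' : Nat) (hv : v = (v' : Int)) (hv1 : 1 ≤ v')
    (hk : 1 ≤ k) (j : Nat) :
    (PySem.List.pyRange 1 (1 + (j : Int)) 1).foldl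
        (tlineStep k v ((PySem.List.dedup cs).map (fun c => (PySem.List.count cs c : Int))))
        ((PySem.List.dedup cs).map (fun _ => List.replicate (v + 1).toNat (0 : Int)), 1,
          if k = 0 then 1 else 0)
      = ((PySem.List.dedup cs).map (fun c => rowSpec cs v j c), (cntV cs v j : Int), ansSpec cs v k j) := by
  have hv0 : (1 : Int) ≤ v := by rw [hv]; exact_mod_cast hv1
  induction j with
  | zero =>
    rw [show (1 : Int) + ((0 : Nat) : Int) = 1 from by norm_num,
      PySem.List.pyRange_one_eq_nil (le_refl 1), List.foldl_nil]
    simp only [Prod.mk.injEq]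
    refine ⟨?_, ?_, ?_⟩
    · apply List.map_congr_left
      intro c _
      exact rowSpec_zero cs v c (by omega)
    · rw [cntV_zero cs v (by omega)]
      rfl
    · unfold ansSpec
      rw [show (1 : Int) + ((0 : Nat) : Int) = 1 from by norm_num,
        PySem.List.pyRange_one_eq_nil hk, List.map_nil, List.sum_nil, if_neg (by omega)]
  | succ j ih =>
    rw [show (1 : Int) + ((j + 1 : Nat) : Int) = (1 + (j : Int)) + 1 from by push_cast; ring,
      PySem.List.pyRange_one_succ_right (by omega), List.foldl_append, ih, List.foldl_cons,
      List.foldl_nil]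
    unfold tlineStep
    simp only [Prod.mk.injEq]
    have hrows : ((((PySem.List.dedup cs).map (fun c => (PySem.List.count cs c : Int))).zip
          ((PySem.List.dedup cs).map (fun c => rowSpec cs v j c))).map
            (fun p => tlineRow v ((cntV cs v j : Int)) p.1 p.2))
        = (PySem.List.dedup cs).map (fun c => rowSpec cs v (j + 1) c) := by
      rw [List.zip_map', List.map_map]
      apply List.map_congr_left
      intro c _
      simp only [Function.comp_def]
      rw [PySem.List.count_eq]
      exact row_step cs v j c v' hv hv1
    have htotal : ((((PySem.List.dedup cs).map (fun c => rowSpec cs v (j + 1) c)).map List.sum).sum : Int)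
        = ((cntV cs v (j + 1) : Int)) := by
      rw [List.map_map]
      have hcg : (PySem.List.dedup cs).map (List.sum ∘ fun c => rowSpec cs v (j + 1) c)
          = (PySem.List.dedup cs).map (fun c =>
              ((((List.range v.toNat).map (fun (r : Nat) => cntR cs v (j + 1) c ((r : Int) + 1))).sum : Nat) : Int)) := by
        apply List.map_congr_left
        intro c _
        simp only [Function.comp_def]
        exact rowSpec_sum cs v (j + 1) c
      rw [hcg, sum_map_cast, rec_total cs v j hv0]
    refine ⟨hrows, ?_, ?_⟩
    · rw [hrows, htotal]
    · rw [hrows, htotal]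
      unfold ansSpec
      rw [show (1 : Int) + ((j + 1 : Nat) : Int) = (1 + (j : Int)) + 1 from by push_cast; ring]
      by_cases hk2 : k ≤ 1 + (j : Int)
      · rw [if_pos hk2, PySem.List.pyRange_one_succ_right (by omega), List.map_append,
          List.sum_append]
        simp only [List.map_cons, List.map_nil, List.sum_cons, List.sum_nil]
        rw [show ((1 : Int) + (j : Int)).toNat = j + 1 from by omega]
        ring
      · rw [if_neg hk2, PySem.List.pyRange_one_eq_nil (by omega),
          PySem.List.pyRange_one_eq_nil (by omega)]

-- geometric sum: (m-1) * Σ_{i∈[a,a+d)} m^i = m^(a+d) - m^a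
theorem geo_sum (m a : Int) (ha : 0 ≤ a) (d : Nat) :
    (m - 1) * ((PySem.List.pyRange a (a + (d : Int)) 1).map (fun i => m ^ i.toNat)).sum
      = m ^ (a + (d : Int)).toNat - m ^ a.toNat := by
  induction d with
  | zero =>
    rw [show a + ((0 : Nat) : Int) = a from by push_cast; ring]
    rw [PySem.List.pyRange_one_eq_nil (le_refl a)]
    simp
  | succ d ih =>
    have h1 : a + ((d + 1 : Nat) : Int) = (a + (d : Int)) + 1 := by push_cast; ring
    rw [h1, PySem.List.pyRange_one_succ_right (by omega), List.map_append, List.sum_append]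
    have h2 : ((a + (d : Int)) + 1).toNat = (a + (d : Int)).toNat + 1 := by omega
    rw [h2]
    simp only [List.map_cons, List.map_nil, List.sum_cons, List.sum_nil]
    rw [mul_add, ih, pow_succ]
    ring

-- A's value as a sum over the lengths, when every tuple counts
theorem tline_eq_sum_pow (k n : Int) (chrs : String) (v : Int)
    (hk : 0 ≤ k) (hbig : v ≤ 0 ∨ n - 1 ≤ v) :
    tline k n chrs v
      = ((PySem.List.pyRange k n 1).map (fun i => (chrs.toList.length : Int) ^ i.toNat)).sum := by
  unfold tline
  have houter : ∀ (t : Int), ∀ i ∈ PySem.List.pyRange k n 1,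
      (tlineProd chrs.toList i.toNat).foldl (fun t xs =>
        if v > 0 then
          let cnts := tlineRuns xs
          if (PySem.List.max? cnts (fun y => y)).getD 0 > v then t else t + 1
        else t + 1) t
      = t + (chrs.toList.length : Int) ^ i.toNat := by
    intro t i hi
    rw [PySem.List.mem_pyRange_one] at hi
    have hpt : ∀ (acc : Int), ∀ xs ∈ tlineProd chrs.toList i.toNat,
        (if v > 0 then
          let cnts := tlineRuns xs
          if (PySem.List.max? cnts (fun y => y)).getD 0 > v then acc else acc + 1
        else acc + 1) = acc + 1 := by
      intro acc xs hxs
      by_cases hvp : v > 0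
      · have hn1 : n - 1 ≤ v := by
          rcases hbig with h | h
          · omega
          · exact h
        have hnot : ¬ (Mv xs > v) := by
          rw [Mv_eq_Fm]
          have h1 := Fm_le_length xs
          rw [length_of_mem_prod hxs] at h1
          have h2 : ((i.toNat : Nat) : Int) = i := by omega
          rw [h2] at h1
          omega
        rw [if_pos hvp]
        show (if Mv xs > v then acc else acc + 1) = acc + 1
        rw [if_neg hnot]
      · rw [if_neg hvp]
    rw [PySem.List.foldl_congr_mem _ _ (fun acc _ => acc + 1) t (fun acc xs hxs => hpt acc xs hxs)]
    rw [PySem.List.foldl_add _ (fun _ => (1 : Int)) t, PySem.List.sum_map_const_int, prod_length]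
    push_cast
    ring
  rw [PySem.List.foldl_congr_mem _ _
    (fun t i => t + (chrs.toList.length : Int) ^ i.toNat) 0 (fun t i hi => houter t i hi)]
  rw [PySem.List.foldl_add]
  ring

-- A's value as a sum of the valid counts per length
theorem tline_eq_sum_cntV (k n : Int) (chrs : String) (v : Int) (hv : 0 < v) :
    tline k n chrs v
      = ((PySem.List.pyRange k n 1).map (fun i => (cntV chrs.toList v i.toNat : Int))).sum := by
  unfold tline
  have houter : ∀ (t : Int), ∀ i ∈ PySem.List.pyRange k n 1,
      (tlineProd chrs.toList i.toNat).foldl (fun t xs =>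
        if v > 0 then
          let cnts := tlineRuns xs
          if (PySem.List.max? cnts (fun y => y)).getD 0 > v then t else t + 1
        else t + 1) t
      = t + (cntV chrs.toList v i.toNat : Int) := by
    intro t i _
    have hpt : ∀ (acc : Int), ∀ xs ∈ tlineProd chrs.toList i.toNat,
        (if v > 0 then
          let cnts := tlineRuns xs
          if (PySem.List.max? cnts (fun y => y)).getD 0 > v then acc else acc + 1
        else acc + 1) = (if Fm xs ≤ v then acc + 1 else acc) := by
      intro acc xs _
      rw [if_pos hv]
      show (if Mv xs > v then acc else acc + 1) = _
      rw [Mv_eq_Fm]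
      by_cases h : Fm xs ≤ v
      · rw [if_neg (by omega), if_pos h]
      · rw [if_pos (by omega), if_neg h]
    rw [PySem.List.foldl_congr_mem _ _ (fun acc xs => if Fm xs ≤ v then acc + 1 else acc) t
      (fun acc xs hxs => hpt acc xs hxs)]
    rw [PySem.List.foldl_ite_add_one (fun xs => Fm xs ≤ v)]
    rfl
  rw [PySem.List.foldl_congr_mem _ _
    (fun t i => t + (cntV chrs.toList v i.toNat : Int)) 0 (fun t i hi => houter t i hi)]
  rw [PySem.List.foldl_add]
  ring

-- ===== VERDICT (by name: the statement is the Claim_ definition above) =====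
theorem tline_spec : Claim_equal_tline := by
  intro k n chrs v _ hpre
  unfold Spec_tline
  by_cases hnk : n ≤ k
  · -- empty range on both sides
    have hlo : n ≤ (if k > 0 then k else 0) := by split_ifs <;> omega
    unfold tline tline_alt
    rw [PySem.List.pyRange_one_eq_nil hnk, List.foldl_nil]
    simp only [hlo, if_pos]
  · have hkn : k < n := by omega
    have hk0 : 0 ≤ k := by
      rcases hpre with h | h | ⟨h, -⟩ <;> omega
    have hlo : (if k > 0 then k else 0) = k := by split_ifs <;> omega
    unfold tline_alt
    simp only [hlo]
    rw [if_neg (by omega : ¬ n ≤ k), PySem.Str.len_eq]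
    by_cases hbig : v ≤ 0 ∨ n - 1 ≤ v
    · rw [if_pos hbig, tline_eq_sum_pow k n chrs v hk0 hbig]
      by_cases hm0 : chrs.toList.length = 0
      · rw [hm0, if_pos (by norm_num)]
        by_cases hk00 : k = 0
        · subst hk00
          rw [if_pos rfl, PySem.List.pyRange_one_cons (by omega), List.map_cons, List.sum_cons]
          have hz : ((PySem.List.pyRange (0 + 1) n 1).map (fun i => ((0 : Nat) : Int) ^ i.toNat)).sum = 0 := by
            apply List.sum_eq_zero
            intro x hx
            simp only [List.mem_map] at hx
            obtain ⟨i, hi, rfl⟩ := hx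
            rw [PySem.List.mem_pyRange_one] at hi
            rw [show ((0 : Nat) : Int) = 0 from rfl, zero_pow (by omega : i.toNat ≠ 0)]
          rw [hz]
          norm_num
        · rw [if_neg hk00]
          apply List.sum_eq_zero
          intro x hx
          simp only [List.mem_map] at hx
          obtain ⟨i, hi, rfl⟩ := hx
          rw [PySem.List.mem_pyRange_one] at hi
          rw [show ((0 : Nat) : Int) = 0 from rfl, zero_pow (by omega : i.toNat ≠ 0)]
      · by_cases hm1 : chrs.toList.length = 1
        · rw [hm1, if_neg (by norm_num), if_pos (by norm_num)]
          have hone : ((PySem.List.pyRange k n 1).map (fun i => ((1 : Nat) : Int) ^ i.toNat))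
              = (PySem.List.pyRange k n 1).map (fun _ => (1 : Int)) := by
            apply List.map_congr_left
            intro i _
            norm_num
          rw [hone, PySem.List.sum_map_const_int, PySem.List.length_pyRange_one]
          have hc : (((n - k).toNat : Nat) : Int) = n - k := by omega
          rw [hc]
          ring
        · have hm2 : 2 ≤ chrs.toList.length := by omega
          rw [if_neg (by omega), if_neg (by omega)]
          have hd : k + (((n - k).toNat : Nat) : Int) = n := by omega
          have hgeo := geo_sum ((chrs.toList.length : Nat) : Int) k hk0 (n - k).toNat
          rw [hd] at hgeo
          rw [← hgeo, PySem.Int.floordiv_eq_ediv_of_pos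
              (by omega : (0 : Int) < ((chrs.toList.length : Nat) : Int) - 1),
            Int.mul_ediv_cancel_left _ (by omega : ((chrs.toList.length : Nat) : Int) - 1 ≠ 0)]
    · rw [if_neg hbig]
      have hv1 : (1 : Int) ≤ v := by omega
      have hk1 : 1 ≤ k := by
        rcases hpre with h | h | ⟨-, h⟩ <;> omega
      have hv' : v = ((v.toNat : Nat) : Int) := by omega
      have hv1' : 1 ≤ v.toNat := by omega
      have hn' : (1 : Int) + (((n - 1).toNat : Nat) : Int) = n := by omega
      rw [tline_eq_sum_cntV k n chrs v (by omega), ← hn',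
        dp_inv chrs.toList v k v.toNat hv' hv1' hk1 ((n - 1).toNat)]
      rfl
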